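-- pv_equiv track=rewrite | github.com/masaakikubota/AnyAIInsightAgent | app/persona_response_manager.py | _parse_manual_stimuli
-- ===== SOURCE A (Python) =====
-- from typing import Dict, List, Optional, Tuple
--
-- def _parse_manual_stimuli(text: Optional[str]) -> List[str]:
--     if not text:
--         return []
--     items = []
--     for line in text.replace("\r\n", "\n").split("\n"):
--         stripped = line.strip()
--         if not stripped:
--             continue
--         parts = [part.strip() for part in stripped.split(",") if part.strip()]
--         if parts:
--             items.extend(parts)
--     return items
-- ===== SOURCE B (Python) =====
-- from typing import List, Optional
--
-- def _parse_manual_stimuli(text: Optional[str]) -> List[str]: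
--     # Single character-level scan with an accumulator: ',' and '\n' both flush the
--     # current token (stripped, dropped if empty). A trailing '\n' sentinel flushes
--     # the last token; no replace/split passes, no nested loops.
--     items: List[str] = []
--     cur: List[str] = []
--     for ch in (text or "") + "\n":
--         if ch in ",\n":
--             tok = "".join(cur).strip()
--             if tok:
--                 items.append(tok)
--             cur = []
--         else:
--             cur.append(ch)
--     return items
-- ===== Notes on version B (the rewrite author's own statement) =====
-- stated objective: alternative
-- what changed: Replaces A's staged passes (replace \r\n, split on newlines, per-line strip, per-line comma split, strip/filter parts) with a single character-level scan that accumulates the current token and flushes it (stripped, dropped if empty) at every ',' or '\n', using a trailing newline sentinel for the last token.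
import Mathlib
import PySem

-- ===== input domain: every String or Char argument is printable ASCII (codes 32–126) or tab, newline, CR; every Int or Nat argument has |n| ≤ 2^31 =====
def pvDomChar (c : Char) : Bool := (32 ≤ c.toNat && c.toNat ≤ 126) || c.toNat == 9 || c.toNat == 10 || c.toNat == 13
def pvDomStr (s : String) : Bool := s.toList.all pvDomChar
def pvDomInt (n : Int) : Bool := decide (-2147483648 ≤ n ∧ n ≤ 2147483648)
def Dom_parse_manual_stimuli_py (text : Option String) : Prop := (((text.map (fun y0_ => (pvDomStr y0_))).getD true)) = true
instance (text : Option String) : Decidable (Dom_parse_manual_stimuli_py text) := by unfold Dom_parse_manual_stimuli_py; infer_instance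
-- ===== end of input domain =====

-- B replaces A's staged passes (replace/split/strip per line, split/strip per part) by a
-- single character-level scan flushing a token accumulator at ',' and '\n'; same value.

-- ===== PORT A =====
-- Python A: nested loops — split on '\n' (after '\r\n' normalization), per line strip,
-- skip empties, split the stripped line on ',', strip/filter the parts, extend.
-- Strings are handled on List Char via PySem.Chars (exact on the domain).
def parse_manual_stimuli_py (text : Option String) : List String :=
  match text with
  | none => []
  | some t =>
    if t.toList = [] then []                       -- `if not text: return []`
    else
      let lines := PySem.Chars.splitOn
        (PySem.Chars.replace t.toList ['\r', '\n'] ['\n']) ['\n']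
      let items := lines.foldl (fun items line =>
        let stripped := PySem.Chars.strip line
        if stripped = [] then items                -- `continue`
        else
          let parts := ((PySem.Chars.splitOn stripped [',']).filter
              (fun p => decide (PySem.Chars.strip p ≠ []))).map PySem.Chars.strip
          if parts = [] then items else items ++ parts) []
      items.map String.ofList

-- ===== PORT B =====
-- Python B: one scan over `(text or "") + "\n"` with a current-token accumulator `cur`;
-- ',' and '\n' flush `strip(cur)` into `items` when non-empty, other chars extend `cur`.
def parse_manual_stimuli_py_alt (text : Option String) : List String :=
  (((text.getD "").toList ++ ['\n']).foldl
    (fun (st : List String × List Char) ch =>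
      if ch = ',' ∨ ch = '\n' then                 -- `if ch in ",\n":` flush
        let tok := PySem.Chars.strip st.2
        (if tok ≠ [] then st.1 ++ [String.ofList tok] else st.1, [])
      else (st.1, st.2 ++ [ch]))                   -- `cur.append(ch)`
    ([], [])).1

-- ===== PRECONDITION & SPEC =====
def Spec_parse_manual_stimuli_py (text : Option String) (out : List String) : Prop := out = parse_manual_stimuli_py_alt text
instance (text : Option String) (out : List String) : Decidable (Spec_parse_manual_stimuli_py text out) := by unfold Spec_parse_manual_stimuli_py; infer_instance

-- ===== CLAIM (what is proved, stated in full; the proofs are below) =====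
def Claim_equal_parse_manual_stimuli_py : Prop := ∀ (text : Option String), Dom_parse_manual_stimuli_py text → Spec_parse_manual_stimuli_py text (parse_manual_stimuli_py text)

-- ===== LEMMAS AND PROOFS =====

-- proof-only reference tokenizer: split a char list on one delimiter
def splitC (c : Char) : List Char → List (List Char)
  | [] => [[]]
  | x :: xs => if x = c then [] :: splitC c xs else (splitC c xs).modifyHead (x :: ·)

theorem splitC_ne_nil (c : Char) (l : List Char) : splitC c l ≠ [] := by
  induction l with
  | nil => simp [splitC]
  | cons x xs ih =>
    simp only [splitC]
    split_ifs
    · simp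
    · cases h : splitC c xs with
      | nil => exact absurd h ih
      | cons a b => simp [List.modifyHead]

theorem go_single (c : Char) (l : List Char) : ∀ (fuel : Nat) (cur : List Char)
    (acc : List (List Char)), l.length < fuel →
    PySem.Chars.splitOn.go [c] fuel l cur acc
      = acc.reverse ++ (splitC c l).modifyHead (cur.reverse ++ ·) := by
  induction l with
  | nil =>
    intro fuel cur acc h
    match fuel, h with
    | fuel + 1, _ => simp [PySem.Chars.splitOn.go, splitC, List.modifyHead]
  | cons x xs ih =>
    intro fuel cur acc h
    match fuel, h with
    | fuel + 1, h =>
      have hx : xs.length < fuel := by simpa using Nat.lt_of_succ_lt_succ h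
      by_cases hc : x = c
      · subst hc
        have hpre : List.isPrefixOf [x] (x :: xs) = true := by
          simp [List.isPrefixOf]
        simp only [PySem.Chars.splitOn.go, hpre, if_pos]
        have hdrop : List.drop (List.length [x]) (x :: xs) = xs := rfl
        rw [hdrop, ih fuel [] (cur.reverse :: acc) (by simpa using hx)]
        cases hs : splitC x xs with
        | nil => exact absurd hs (splitC_ne_nil x xs)
        | cons a b =>
          simp [splitC, hs, List.modifyHead]
      · have hpre : List.isPrefixOf [c] (x :: xs) = false := by
          simp [List.isPrefixOf]
          intro hcx; exact absurd hcx.symm hc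
        simp only [PySem.Chars.splitOn.go, hpre, Bool.false_eq_true, if_false]
        rw [ih fuel (x :: cur) acc hx]
        cases hs : splitC c xs with
        | nil => exact absurd hs (splitC_ne_nil c xs)
        | cons a b =>
          simp [splitC, hs, hc, List.modifyHead]

theorem splitOn_single (c : Char) (l : List Char) :
    PySem.Chars.splitOn l [c] = splitC c l := by
  unfold PySem.Chars.splitOn
  rw [go_single c l (l.length + 1) [] [] (Nat.lt_succ_self _)]
  cases h : splitC c l with
  | nil => exact absurd h (splitC_ne_nil c l)
  | cons a b => simp [List.modifyHead]

-- folding ',' into '\n' then splitting on '\n' = split on '\n', then each piece on ','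
theorem splitC_replace (l : List Char) :
    splitC '\n' (l.map (fun c => if c = ',' then '\n' else c))
      = (splitC '\n' l).flatMap (splitC ',') := by
  induction l with
  | nil => simp [splitC]
  | cons x xs ih =>
    by_cases hn : x = '\n'
    · subst hn
      simp [splitC, ih]
    · by_cases hcm : x = ','
      · subst hcm
        cases hs : splitC '\n' xs with
        | nil => exact absurd hs (splitC_ne_nil _ _)
        | cons a b =>
          simp [splitC, ih, hs, List.modifyHead]
      · cases hs : splitC '\n' xs with
        | nil => exact absurd hs (splitC_ne_nil _ _)
        | cons a b =>
          cases ha : splitC ',' a with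
          | nil => exact absurd ha (splitC_ne_nil _ _)
          | cons p q =>
            simp [splitC, ih, hs, ha, hcm, hn, List.modifyHead]

-- the per-token post-processing A applies
def Fline (l : List Char) : List (List Char) :=
  ((splitC ',' l).map PySem.Chars.strip).filter (fun s => decide (s ≠ []))

theorem rstrip_cons (c : Char) (t : List Char) :
    PySem.Chars.rstrip (c :: t)
      = if PySem.Chars.rstrip t = [] then
          (if PySem.Chars.isspace c then [] else [c])
        else c :: PySem.Chars.rstrip t := by
  simp only [PySem.Chars.rstrip, List.reverse_cons, List.dropWhile_append]
  by_cases h : List.dropWhile PySem.Chars.isspace t.reverse = []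
  · simp [h, List.dropWhile]
    by_cases hc : PySem.Chars.isspace c <;> simp [hc]
  · simp [h]

theorem lstrip_cons_of_space {c : Char} (t : List Char)
    (hc : PySem.Chars.isspace c = true) :
    PySem.Chars.lstrip (c :: t) = PySem.Chars.lstrip t := by
  simp [PySem.Chars.lstrip, List.dropWhile, hc]

theorem lstrip_cons_of_not_space {c : Char} (t : List Char)
    (hc : PySem.Chars.isspace c = false) :
    PySem.Chars.lstrip (c :: t) = c :: t := by
  simp [PySem.Chars.lstrip, List.dropWhile, hc]

theorem lstrip_rstrip_comm (l : List Char) :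
    PySem.Chars.lstrip (PySem.Chars.rstrip l)
      = PySem.Chars.rstrip (PySem.Chars.lstrip l) := by
  induction l with
  | nil => simp [PySem.Chars.lstrip, PySem.Chars.rstrip]
  | cons c t ih =>
    by_cases hc : PySem.Chars.isspace c = true
    · rw [lstrip_cons_of_space t hc, rstrip_cons, ← ih]
      by_cases h : PySem.Chars.rstrip t = []
      · rw [if_pos h, if_pos hc, h]
      · rw [if_neg h, lstrip_cons_of_space _ hc]
    · have hc' : PySem.Chars.isspace c = false := by
        cases hcb : PySem.Chars.isspace c
        · rfl
        · exact absurd hcb hc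
      rw [lstrip_cons_of_not_space t hc', rstrip_cons]
      by_cases h : PySem.Chars.rstrip t = []
      · rw [if_pos h, if_neg (by simp [hc'])]
        exact lstrip_cons_of_not_space [] hc'
      · rw [if_neg h]
        exact lstrip_cons_of_not_space _ hc'

theorem lstrip_reverse (l : List Char) :
    PySem.Chars.lstrip l.reverse = (PySem.Chars.rstrip l).reverse := by
  simp [PySem.Chars.rstrip, PySem.Chars.lstrip]

theorem strip_reverse (l : List Char) :
    PySem.Chars.strip l.reverse = (PySem.Chars.strip l).reverse := by
  simp only [PySem.Chars.strip]
  rw [lstrip_reverse, ← lstrip_rstrip_comm]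
  simp only [PySem.Chars.rstrip, List.reverse_reverse]
  rw [← PySem.Chars.lstrip]

def appLast (x : Char) : List (List Char) → List (List Char)
  | [] => [[x]]
  | [a] => [a ++ [x]]
  | a :: b :: r => a :: appLast x (b :: r)

theorem appLast_append_singleton (x : Char) (ys : List (List Char)) (z : List Char) :
    appLast x (ys ++ [z]) = ys ++ [z ++ [x]] := by
  induction ys with
  | nil => rfl
  | cons a ys ih =>
    cases ys with
    | nil => rfl
    | cons b r =>
      simp only [List.cons_append, appLast]
      rw [show b :: (r ++ [z]) = (b :: r) ++ [z] from rfl, ih]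
      simp

theorem splitC_append_singleton (c x : Char) (l : List Char) :
    splitC c (l ++ [x])
      = if x = c then splitC c l ++ [[]] else appLast x (splitC c l) := by
  induction l with
  | nil =>
    by_cases hx : x = c <;> simp [splitC, hx, appLast, List.modifyHead]
  | cons y l ih =>
    cases hs : splitC c l with
    | nil => exact absurd hs (splitC_ne_nil _ _)
    | cons a b =>
      rw [hs] at ih
      by_cases hx : x = c
      · rw [if_pos hx] at ih ⊢
        by_cases hy : y = c
        · simp [splitC, hy, ih, hs]
        · simp [splitC, hy, ih, hs, List.modifyHead]
      · rw [if_neg hx] at ih ⊢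
        by_cases hy : y = c
        · simp [splitC, hy, ih, hs, appLast]
        · cases b with
          | nil => simp [splitC, hy, ih, hs, List.modifyHead, appLast]
          | cons b0 bs => simp [splitC, hy, ih, hs, List.modifyHead, appLast]

theorem splitC_reverse (c : Char) (l : List Char) :
    splitC c l.reverse = ((splitC c l).map List.reverse).reverse := by
  induction l with
  | nil => simp [splitC]
  | cons x xs ih =>
    rw [List.reverse_cons, splitC_append_singleton]
    by_cases hx : x = c
    · subst hx
      simp [splitC, ih]
    · cases hs : splitC c xs with
      | nil => exact absurd hs (splitC_ne_nil _ _)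
      | cons a b =>
        rw [if_neg hx, ih, hs]
        simp only [List.map_cons, List.reverse_cons]
        rw [appLast_append_singleton]
        simp [splitC, hx, hs, List.modifyHead]

theorem Fline_lstrip (l : List Char) : Fline (PySem.Chars.lstrip l) = Fline l := by
  induction l with
  | nil => rfl
  | cons c t ih =>
    by_cases hc : PySem.Chars.isspace c = true
    · rw [lstrip_cons_of_space t hc, ih]
      have hcm : c ≠ ',' := by
        intro h; subst h; simp [PySem.Chars.isspace] at hc
      cases hs : splitC ',' t with
      | nil => exact absurd hs (splitC_ne_nil _ _)
      | cons a b =>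
        have hstr : PySem.Chars.strip (c :: a) = PySem.Chars.strip a := by
          simp only [PySem.Chars.strip, lstrip_cons_of_space a hc]
        simp [Fline, splitC, hcm, hs, List.modifyHead, hstr]
    · have hc' : PySem.Chars.isspace c = false := by
        cases hcb : PySem.Chars.isspace c
        · rfl
        · exact absurd hcb hc
      rw [lstrip_cons_of_not_space t hc']

theorem Fline_reverse (l : List Char) :
    Fline l.reverse = ((Fline l).map List.reverse).reverse := by
  simp only [Fline, splitC_reverse, List.map_reverse, List.map_map,
    List.filter_reverse, List.filter_map]
  congr 1
  · congr 1
    · funext x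
      simp [strip_reverse]
    · congr 1
      funext x
      simp [Function.comp, strip_reverse]

theorem Fline_rstrip (l : List Char) : Fline (PySem.Chars.rstrip l) = Fline l := by
  have h1 : PySem.Chars.rstrip l = (PySem.Chars.lstrip l.reverse).reverse := by
    rw [lstrip_reverse, List.reverse_reverse]
  rw [h1, Fline_reverse, Fline_lstrip, Fline_reverse]
  simp [List.map_map]

theorem Fline_strip (l : List Char) : Fline (PySem.Chars.strip l) = Fline l := by
  simp only [PySem.Chars.strip]
  rw [Fline_rstrip, Fline_lstrip]

theorem Fline_nil_of_strip_nil (l : List Char)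
    (h : PySem.Chars.strip l = []) : Fline l = [] := by
  rw [← Fline_strip, h]
  rfl

-- A's per-line contribution is Fline
theorem partsA_eq_Fline (line : List Char) :
    (if PySem.Chars.strip line = [] then ([] : List (List Char))
     else ((splitC ',' (PySem.Chars.strip line)).filter
         (fun p => decide (PySem.Chars.strip p ≠ []))).map PySem.Chars.strip)
      = Fline line := by
  by_cases h : PySem.Chars.strip line = []
  · rw [if_pos h, Fline_nil_of_strip_nil line h]
  · rw [if_neg h, ← Fline_strip line]
    unfold Fline
    induction splitC ',' (PySem.Chars.strip line) with
    | nil => rfl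
    | cons a b ih =>
      simp only [ne_eq, decide_not] at ih
      by_cases ha : PySem.Chars.strip a = []
      · simp [ha, ih]
      · simp [ha, ih]

-- A's fold accumulates the flatMap of per-line contributions
theorem foldA (lines : List (List Char)) : ∀ acc : List (List Char),
    lines.foldl (fun items line =>
      let stripped := PySem.Chars.strip line
      if stripped = [] then items
      else
        let parts := ((PySem.Chars.splitOn stripped [',']).filter
            (fun p => decide (PySem.Chars.strip p ≠ []))).map PySem.Chars.strip
        if parts = [] then items else items ++ parts) acc
      = acc ++ lines.flatMap Fline := by
  induction lines with
  | nil => intro acc; simp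
  | cons line rest ih =>
    intro acc
    simp only [List.foldl_cons, List.flatMap_cons]
    rw [ih]
    by_cases h : PySem.Chars.strip line = []
    · simp only [h]
      rw [Fline_nil_of_strip_nil line h]
      simp
    · simp only [if_neg h, splitOn_single]
      have := partsA_eq_Fline line
      rw [if_neg h] at this
      rw [this]
      by_cases hf : Fline line = []
      · simp [hf]
      · simp [hf]

-- ===== B-side lemmas: the scanner =====

-- two-delimiter reference split (',' or '\n')
def split2 : List Char → List (List Char)
  | [] => [[]]
  | x :: xs =>
    if x = ',' ∨ x = '\n' then [] :: split2 xs else (split2 xs).modifyHead (x :: ·)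

theorem split2_ne_nil (l : List Char) : split2 l ≠ [] := by
  induction l with
  | nil => simp [split2]
  | cons x xs ih =>
    simp only [split2]
    split_ifs
    · simp
    · cases h : split2 xs with
      | nil => exact absurd h ih
      | cons a b => simp [List.modifyHead]

-- splitting on both delimiters = fold ',' into '\n' then split on '\n'
theorem split2_eq (l : List Char) :
    split2 l = splitC '\n' (l.map (fun c => if c = ',' then '\n' else c)) := by
  induction l with
  | nil => rfl
  | cons x xs ih =>
    by_cases hcm : x = ','
    · simp [split2, splitC, hcm, ih]
    · by_cases hn : x = '\n'
      · simp [split2, splitC, hn, ih]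
      · simp [split2, splitC, hcm, hn, ih]

-- one flushed token's contribution
def FdS (l : List Char) : List String :=
  if PySem.Chars.strip l ≠ [] then [String.ofList (PySem.Chars.strip l)] else []

-- scanner invariant: the whole scan (with the trailing '\n') emits FdS of each token
theorem scan_inv (cs : List Char) : ∀ (items : List String) (cur : List Char),
    ((cs ++ ['\n']).foldl
      (fun (st : List String × List Char) ch =>
        if ch = ',' ∨ ch = '\n' then
          let tok := PySem.Chars.strip st.2
          (if tok ≠ [] then st.1 ++ [String.ofList tok] else st.1, [])
        else (st.1, st.2 ++ [ch])) (items, cur)).1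
      = items ++ ((split2 cs).modifyHead (cur ++ ·)).flatMap FdS := by
  induction cs with
  | nil =>
    intro items cur
    simp [split2, List.modifyHead, FdS]
    by_cases h : PySem.Chars.strip cur = [] <;> simp [h]
  | cons x xs ih =>
    intro items cur
    by_cases hd : x = ',' ∨ x = '\n'
    · have hstep : ((x :: xs) ++ ['\n']) = x :: (xs ++ ['\n']) := rfl
      rw [hstep, List.foldl_cons]
      simp only [hd, if_true]
      rw [ih]
      cases hs : split2 xs with
      | nil => exact absurd hs (split2_ne_nil _)
      | cons a b =>
        simp only [split2, hd, if_true, hs, List.modifyHead, List.flatMap_cons, FdS]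
        by_cases h : PySem.Chars.strip cur = [] <;>
          simp [h, List.append_assoc]
    · have hstep : ((x :: xs) ++ ['\n']) = x :: (xs ++ ['\n']) := rfl
      rw [hstep, List.foldl_cons]
      simp only [hd, if_false]
      rw [ih]
      cases hs : split2 xs with
      | nil => exact absurd hs (split2_ne_nil _)
      | cons a b =>
        simp [split2, hd, hs, List.modifyHead, List.append_assoc]

-- per-token contributions, summed, equal A's filter-then-map pipeline (as Strings)
theorem flatMap_FdS (ts : List (List Char)) :
    ts.flatMap FdS
      = (((ts.filter (fun tok => decide (PySem.Chars.strip tok ≠ []))).map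
          PySem.Chars.strip).map String.ofList) := by
  induction ts with
  | nil => rfl
  | cons a b ih =>
    by_cases ha : PySem.Chars.strip a = []
    · simp [FdS, ha, ih]
    · simp [FdS, ha, ih]

-- B's value, in closed form
theorem B_closed (cs : List Char) :
    (((cs ++ ['\n']).foldl
      (fun (st : List String × List Char) ch =>
        if ch = ',' ∨ ch = '\n' then
          let tok := PySem.Chars.strip st.2
          (if tok ≠ [] then st.1 ++ [String.ofList tok] else st.1, [])
        else (st.1, st.2 ++ [ch])) ([], [])).1)
      = (((split2 cs).filter (fun tok => decide (PySem.Chars.strip tok ≠ []))).map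
          PySem.Chars.strip).map String.ofList := by
  rw [scan_inv cs [] []]
  cases hs : split2 cs with
  | nil => exact absurd hs (split2_ne_nil _)
  | cons a b =>
    simp only [List.modifyHead, List.nil_append]
    rw [← hs, flatMap_FdS]

-- normalization '\r\n' -> '\n', in recursive form
def repl2 : List Char → List Char
  | '\r' :: '\n' :: r => '\n' :: repl2 r
  | x :: r => x :: repl2 r
  | [] => []

theorem repl2_cons (x : Char) (r : List Char)
    (h : ∀ t : List Char, x = '\r' → r = '\n' :: t → False) :
    repl2 (x :: r) = x :: repl2 r := by
  cases r with
  | nil =>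
    by_cases hx : x = '\r'
    · subst hx; rfl
    · simp only [repl2]
  | cons y t =>
    by_cases hx : x = '\r'
    · subst hx
      by_cases hy : y = '\n'
      · subst hy; exact (h t rfl rfl).elim
      · simp only [repl2]
    · simp only [repl2]

theorem isPrefixOf_crlf_false (x : Char) (r : List Char)
    (h : ∀ t : List Char, x = '\r' → r = '\n' :: t → False) :
    List.isPrefixOf ['\r', '\n'] (x :: r) = false := by
  cases hb : List.isPrefixOf ['\r', '\n'] (x :: r) with
  | false => rfl
  | true =>
    exfalso
    obtain ⟨t', ht'⟩ := List.isPrefixOf_iff_prefix.mp hb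
    have ht2 : '\r' :: '\n' :: t' = x :: r := ht'
    injection ht2 with h1 h2
    exact h t' h1.symm h2.symm

theorem replace_crlf_go (l : List Char) : ∀ (fuel : Nat) (acc : List Char),
    l.length ≤ fuel →
    PySem.Chars.replace.go ['\r', '\n'] ['\n'] fuel l acc
      = acc.reverse ++ repl2 l := by
  induction l using repl2.induct with
  | case1 r ih =>
    intro fuel acc h
    match fuel, h with
    | fuel + 1, h =>
      have hpre : List.isPrefixOf ['\r', '\n'] ('\r' :: '\n' :: r) = true := by
        simp [List.isPrefixOf]
      simp only [PySem.Chars.replace.go, hpre, if_pos]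
      have hr : r.length ≤ fuel := by
        simp only [List.length_cons] at h; omega
      rw [show List.drop (List.length ['\r', '\n']) ('\r' :: '\n' :: r) = r from rfl,
        ih fuel (['\n'].reverse ++ acc) hr]
      simp [repl2]
  | case2 x r hne ih =>
    intro fuel acc h
    match fuel, h with
    | fuel + 1, h =>
      have hpre := isPrefixOf_crlf_false x r hne
      simp only [PySem.Chars.replace.go, hpre, Bool.false_eq_true, if_false]
      have hr : r.length ≤ fuel := by
        simp only [List.length_cons] at h; omega
      rw [ih fuel (x :: acc) hr, repl2_cons x r hne]
      simp
  | case3 =>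
    intro fuel acc h
    cases fuel <;> simp [PySem.Chars.replace.go, repl2]

theorem replace_crlf (l : List Char) :
    PySem.Chars.replace l ['\r', '\n'] ['\n'] = repl2 l := by
  unfold PySem.Chars.replace
  simp only [List.isEmpty_cons, Bool.false_eq_true, if_false]
  exact (replace_crlf_go l l.length [] (Nat.le_refl _)).trans (by simp)

-- a trailing '\r' never survives strip
theorem rstrip_append_cr (l : List Char) :
    PySem.Chars.rstrip (l ++ ['\r']) = PySem.Chars.rstrip l := by
  simp [PySem.Chars.rstrip,
    (by decide : PySem.Chars.isspace '\r' = true)]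

theorem strip_append_cr (l : List Char) :
    PySem.Chars.strip (l ++ ['\r']) = PySem.Chars.strip l := by
  simp only [PySem.Chars.strip]
  rw [← lstrip_rstrip_comm, rstrip_append_cr, lstrip_rstrip_comm]

-- the common strip-filter postprocessing, token-list level
def Qtok (ts : List (List Char)) : List (List Char) :=
  (ts.filter (fun t => decide (PySem.Chars.strip t ≠ []))).map PySem.Chars.strip

theorem Qtok_append (a b : List (List Char)) : Qtok (a ++ b) = Qtok a ++ Qtok b := by
  simp [Qtok]

theorem Fline_eq_Qtok (l : List Char) : Fline l = Qtok (splitC ',' l) := by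
  unfold Fline Qtok
  induction splitC ',' l with
  | nil => rfl
  | cons a b ih =>
    simp only [ne_eq, decide_not] at ih
    by_cases ha : PySem.Chars.strip a = [] <;> simp [ha, ih]

theorem flatMap_Fline (lines : List (List Char)) :
    lines.flatMap Fline = Qtok (lines.flatMap (splitC ',')) := by
  induction lines with
  | nil => rfl
  | cons a b ih =>
    simp only [List.flatMap_cons, Qtok_append, ih, Fline_eq_Qtok]

-- normalization does not change the stripped, non-empty tokens
theorem Qtok_cons (a : List Char) (ts : List (List Char)) :
    Qtok (a :: ts)
      = (if PySem.Chars.strip a = [] then [] else [PySem.Chars.strip a]) ++ Qtok ts := by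
  by_cases ha : PySem.Chars.strip a = [] <;> simp [Qtok, ha]

theorem Qtok_repl2 (cs : List Char) : ∀ cur : List Char,
    Qtok ((split2 (repl2 cs)).modifyHead (cur ++ ·))
      = Qtok ((split2 cs).modifyHead (cur ++ ·)) := by
  induction cs using repl2.induct with
  | case1 r ih =>
    intro cur
    have h2 : split2 ('\r' :: '\n' :: r) = ['\r'] :: split2 r := by
      cases hs : split2 r with
      | nil => exact absurd hs (split2_ne_nil _)
      | cons a b => simp [split2, hs, List.modifyHead]
    have h3 : split2 ('\n' :: repl2 r) = [] :: split2 (repl2 r) := by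
      simp [split2]
    have hmain := ih []
    simp only [List.nil_append] at hmain
    have hid : ∀ ts : List (List Char), ts.modifyHead (fun a => a) = ts := by
      intro ts; cases ts <;> rfl
    rw [hid, hid] at hmain
    rw [show repl2 ('\r' :: '\n' :: r) = '\n' :: repl2 r from rfl, h2, h3]
    simp only [List.modifyHead, List.append_nil]
    rw [Qtok_cons, Qtok_cons, strip_append_cr, hmain]
  | case2 x r hne ih =>
    intro cur
    rw [repl2_cons x r hne]
    by_cases hd : x = ',' ∨ x = '\n'
    · have h2 : split2 (x :: repl2 r) = [] :: split2 (repl2 r) := by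
        simp [split2, hd]
      have h3 : split2 (x :: r) = [] :: split2 r := by
        simp [split2, hd]
      have hmain := ih []
      simp only [List.nil_append] at hmain
      have hid : ∀ ts : List (List Char), ts.modifyHead (fun a => a) = ts := by
        intro ts; cases ts <;> rfl
      rw [hid, hid] at hmain
      rw [h2, h3]
      simp only [List.modifyHead, List.append_nil]
      rw [Qtok_cons, Qtok_cons, hmain]
    · cases hs : split2 (repl2 r) with
      | nil => exact absurd hs (split2_ne_nil _)
      | cons a b =>
        cases ht : split2 r with
        | nil => exact absurd ht (split2_ne_nil _)
        | cons p q =>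
          have h2 : split2 (x :: repl2 r) = (x :: a) :: b := by
            simp [split2, hd, hs, List.modifyHead]
          have h3 : split2 (x :: r) = (x :: p) :: q := by
            simp [split2, hd, ht, List.modifyHead]
          rw [h2, h3]
          have hmain := ih (cur ++ [x])
          rw [hs, ht] at hmain
          simpa [List.modifyHead, List.append_assoc] using hmain
  | case3 =>
    intro cur; rfl

-- B's closed form collapses A's nested pipeline
theorem A_closed (cs : List Char) :
    (PySem.Chars.splitOn (PySem.Chars.replace cs ['\r', '\n'] ['\n']) ['\n']).foldl
      (fun items line =>
        let stripped := PySem.Chars.strip line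
        if stripped = [] then items
        else
          let parts := ((PySem.Chars.splitOn stripped [',']).filter
              (fun p => decide (PySem.Chars.strip p ≠ []))).map PySem.Chars.strip
          if parts = [] then items else items ++ parts) []
      = ((split2 cs).filter (fun tok => decide (PySem.Chars.strip tok ≠ []))).map
          PySem.Chars.strip := by
  rw [foldA, List.nil_append, flatMap_Fline, splitOn_single, replace_crlf,
    ← splitC_replace, ← split2_eq]
  have hmain := Qtok_repl2 cs []
  simp only [List.nil_append] at hmain
  have hid : ∀ ts : List (List Char), ts.modifyHead (fun a => a) = ts := by
    intro ts; cases ts <;> rfl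
  rw [hid, hid] at hmain
  exact hmain

-- ===== VERDICT (by name: the statement is the Claim_ definition above) =====
theorem parse_manual_stimuli_py_spec : Claim_equal_parse_manual_stimuli_py := by
  intro text _
  unfold Spec_parse_manual_stimuli_py parse_manual_stimuli_py parse_manual_stimuli_py_alt
  match text with
  | none => rfl
  | some t =>
    simp only [Option.getD_some]
    by_cases ht : t.toList = []
    · rw [ht]
      rfl
    · simp only [ht, if_false]
      rw [B_closed, ← A_closed]
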